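-- pv_equiv track=rewrite | github.com/GreatlyDev/cerebro-osrs | backend/app/services/account_brain.py | _next_sync_needed
-- ===== SOURCE A (Python) =====
-- def _next_sync_needed(missing_inputs: list[str]) -> str:
--     priority = (
--         "hiscores sync",
--         "runelite companion sync",
--         "bank sync",
--         "equipped gear",
--         "active goal",
--         "quest state",
--         "gear ownership",
--     )
--     for item in priority:
--         if item in missing_inputs:
--             return item
--     return "none"
-- ===== SOURCE B (Python) =====
-- def _next_sync_needed(missing_inputs: list[str]) -> str:
--     rank = {name: i for i, name in enumerate((
--         "hiscores sync",
--         "runelite companion sync",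
--         "bank sync",
--         "equipped gear",
--         "active goal",
--         "quest state",
--         "gear ownership",
--     ))}
--     best_idx = None
--     best_name = "none"
--     for name in missing_inputs:
--         i = rank.get(name)
--         if i is not None and (best_idx is None or i < best_idx):
--             best_idx = i
--             best_name = name
--     return best_name
-- ===== Notes on version B (the rewrite author's own statement) =====
-- stated objective: alternative
-- what changed: B builds a name->index rank dict once and does a single pass over missing_inputs keeping the element of minimum rank, instead of scanning the fixed priority tuple with a membership test per entry.
import Mathlib
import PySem

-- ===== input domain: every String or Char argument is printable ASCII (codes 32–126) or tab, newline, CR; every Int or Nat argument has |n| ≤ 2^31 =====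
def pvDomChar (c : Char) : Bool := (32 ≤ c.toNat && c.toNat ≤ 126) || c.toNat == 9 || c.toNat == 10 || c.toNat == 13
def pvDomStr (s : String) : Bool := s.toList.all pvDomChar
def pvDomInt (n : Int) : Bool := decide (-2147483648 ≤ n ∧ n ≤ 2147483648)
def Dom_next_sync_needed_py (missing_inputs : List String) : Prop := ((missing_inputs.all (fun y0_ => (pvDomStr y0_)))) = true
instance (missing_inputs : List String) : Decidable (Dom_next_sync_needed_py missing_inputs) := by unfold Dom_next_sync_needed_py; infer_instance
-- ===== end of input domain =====

-- B replaces A's scan of the fixed priority tuple (membership test per entry) by a rank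
-- dict built once and a single pass over missing_inputs keeping the minimum-rank element
-- (objective: alternative decomposition, same result).

-- ===== PORT A =====
def pvPriority : List String :=
  ["hiscores sync", "runelite companion sync", "bank sync", "equipped gear",
   "active goal", "quest state", "gear ownership"]

def pvLoopA (missing_inputs : List String) : List String → String
  | [] => "none"
  | p :: rest => if p ∈ missing_inputs then p else pvLoopA missing_inputs rest

def next_sync_needed_py (missing_inputs : List String) : String :=
  pvLoopA missing_inputs pvPriority

-- ===== PORT B =====
-- rank = {name: i for i, name in enumerate(priority)}
def pvRank : PySem.Dict String Int :=
  PySem.Dict.ofList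
    [("hiscores sync", 0), ("runelite companion sync", 1), ("bank sync", 2),
     ("equipped gear", 3), ("active goal", 4), ("quest state", 5), ("gear ownership", 6)]

-- one loop iteration of Source B: state = (best_idx, best_name)
def pvStepB (acc : Option Int × String) (name : String) : Option Int × String :=
  match PySem.Dict.get? pvRank name with
  | none => acc
  | some i =>
    match acc.1 with
    | none => (some i, name)
    | some b => if i < b then (some i, name) else acc

def next_sync_needed_py_alt (missing_inputs : List String) : String :=
  (missing_inputs.foldl pvStepB (none, "none")).2

-- ===== PRECONDITION & SPEC =====
def Spec_next_sync_needed_py (missing_inputs : List String) (out : String) : Prop := out = next_sync_needed_py_alt missing_inputs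
instance (missing_inputs : List String) (out : String) : Decidable (Spec_next_sync_needed_py missing_inputs out) := by unfold Spec_next_sync_needed_py; infer_instance

-- ===== CLAIM (what is proved, stated in full; the proofs are below) =====
def Claim_equal_next_sync_needed_py : Prop := ∀ (missing_inputs : List String), Dom_next_sync_needed_py missing_inputs → Spec_next_sync_needed_py missing_inputs (next_sync_needed_py missing_inputs)

-- ===== LEMMAS AND PROOFS =====

-- canonical name of each rank (7 = the "nothing found" sentinel)
def pvNameOf (i : Int) : String :=
  if i = 0 then "hiscores sync" else if i = 1 then "runelite companion sync"
  else if i = 2 then "bank sync" else if i = 3 then "equipped gear"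
  else if i = 4 then "active goal" else if i = 5 then "quest state"
  else if i = 6 then "gear ownership" else "none"

-- minimum rank occurring in ms, starting from b
def pvMin (ms : List String) (b : Int) : Int :=
  ms.foldl (fun a n => match PySem.Dict.get? pvRank n with | some i => min a i | none => a) b

lemma rank_name_chain (x : String) (i : Int) (h : PySem.Dict.get? pvRank x = some i) :
    0 ≤ i ∧ i ≤ 6 ∧ x = pvNameOf i := by
  have hR : pvRank = PySem.Dict.mk
    [("hiscores sync", 0), ("runelite companion sync", 1), ("bank sync", 2),
     ("equipped gear", 3), ("active goal", 4), ("quest state", 5), ("gear ownership", 6)] := by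
    decide
  rw [hR] at h
  simp only [PySem.Dict.get?_mk_cons] at h
  split_ifs at h with h1 h2 h3 h4 h5 h6 h7
  · injection h with h'; subst h'
    exact ⟨by decide, by decide, by rw [← beq_iff_eq.mp h1]; decide⟩
  · injection h with h'; subst h'
    exact ⟨by decide, by decide, by rw [← beq_iff_eq.mp h2]; decide⟩
  · injection h with h'; subst h'
    exact ⟨by decide, by decide, by rw [← beq_iff_eq.mp h3]; decide⟩
  · injection h with h'; subst h'
    exact ⟨by decide, by decide, by rw [← beq_iff_eq.mp h4]; decide⟩
  · injection h with h'; subst h'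
    exact ⟨by decide, by decide, by rw [← beq_iff_eq.mp h5]; decide⟩
  · injection h with h'; subst h'
    exact ⟨by decide, by decide, by rw [← beq_iff_eq.mp h6]; decide⟩
  · injection h with h'; subst h'
    exact ⟨by decide, by decide, by rw [← beq_iff_eq.mp h7]; decide⟩
  · rw [show (PySem.Dict.mk ([] : List (String × Int))).get? x = none from rfl] at h
    exact absurd h (by simp)

lemma name_rank (k : Int) (h0 : 0 ≤ k) (h6 : k ≤ 6) :
    PySem.Dict.get? pvRank (pvNameOf k) = some k := by
  interval_cases k <;> decide

lemma pvMin_cons_none (x : String) (ms : List String) (b : Int)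
    (hx : PySem.Dict.get? pvRank x = none) : pvMin (x :: ms) b = pvMin ms b := by
  simp [pvMin, hx]

lemma pvMin_cons_some (x : String) (ms : List String) (b i : Int)
    (hx : PySem.Dict.get? pvRank x = some i) : pvMin (x :: ms) b = pvMin ms (min b i) := by
  simp [pvMin, hx]

lemma pvMin_le_init (ms : List String) (b : Int) : pvMin ms b ≤ b := by
  induction ms generalizing b with
  | nil => simp [pvMin]
  | cons x ms ih =>
    cases hx : PySem.Dict.get? pvRank x with
    | none => rw [pvMin_cons_none x ms b hx]; exact ih b
    | some i =>
      rw [pvMin_cons_some x ms b i hx]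
      calc pvMin ms (min b i) ≤ min b i := ih _
        _ ≤ b := min_le_left _ _

lemma pvMin_le_of_mem (ms : List String) (b : Int) (x : String) (i : Int)
    (hmem : x ∈ ms) (hx : PySem.Dict.get? pvRank x = some i) : pvMin ms b ≤ i := by
  induction ms generalizing b with
  | nil => cases hmem
  | cons y ms ih =>
    rcases List.mem_cons.mp hmem with heq | hmem'
    · subst heq
      rw [pvMin_cons_some x ms b i hx]
      calc pvMin ms (min b i) ≤ min b i := pvMin_le_init ms _
        _ ≤ i := min_le_right _ _
    · cases hy : PySem.Dict.get? pvRank y with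
      | none => rw [pvMin_cons_none y ms b hy]; exact ih b hmem'
      | some j => rw [pvMin_cons_some y ms b j hy]; exact ih _ hmem'

lemma pvMin_lb (ms : List String) (b : Int) :
    pvMin ms b = b ∨ ∃ x ∈ ms, PySem.Dict.get? pvRank x = some (pvMin ms b) := by
  induction ms generalizing b with
  | nil => left; simp [pvMin]
  | cons y ms ih =>
    cases hy : PySem.Dict.get? pvRank y with
    | none =>
      rw [pvMin_cons_none y ms b hy]
      rcases ih b with h | ⟨x, hx, hrk⟩
      · left; exact h
      · right; exact ⟨x, List.mem_cons_of_mem _ hx, hrk⟩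
    | some i =>
      rw [pvMin_cons_some y ms b i hy]
      rcases ih (min b i) with h | ⟨x, hx, hrk⟩
      · rcases min_choice b i with hmin | hmin
        · left; rw [h, hmin]
        · right; exact ⟨y, List.mem_cons_self, by rw [hy, h, hmin]⟩
      · right; exact ⟨x, List.mem_cons_of_mem _ hx, hrk⟩

-- invariant tying Source B's (best_idx, best_name) state to a single integer
def pvRep (acc : Option Int × String) (b : Int) : Prop :=
  (acc = (none, "none") ∧ b = 7) ∨ (acc = (some b, pvNameOf b) ∧ 0 ≤ b ∧ b ≤ 6)

lemma rep_fold (ms : List String) (acc : Option Int × String) (b : Int) (h : pvRep acc b) :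
    pvRep (ms.foldl pvStepB acc) (pvMin ms b) := by
  induction ms generalizing acc b with
  | nil => simpa [pvMin] using h
  | cons x ms ih =>
    rw [List.foldl_cons]
    cases hx : PySem.Dict.get? pvRank x with
    | none =>
      rw [pvMin_cons_none x ms b hx]
      have hstep : pvStepB acc x = acc := by simp [pvStepB, hx]
      rw [hstep]
      exact ih acc b h
    | some i =>
      rw [pvMin_cons_some x ms b i hx]
      obtain ⟨hi0, hi6, hname⟩ := rank_name_chain x i hx
      rcases h with ⟨hacc, hb⟩ | ⟨hacc, hb0, hb6⟩
      · have hstep : pvStepB acc x = (some i, x) := by simp [pvStepB, hx, hacc]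
        have hmin : min b i = i := by omega
        rw [hstep, hmin]
        exact ih _ i (Or.inr ⟨by rw [hname], hi0, hi6⟩)
      · by_cases hlt : i < b
        · have hstep : pvStepB acc x = (some i, x) := by simp [pvStepB, hx, hacc, hlt]
          have hmin : min b i = i := by omega
          rw [hstep, hmin]
          exact ih _ i (Or.inr ⟨by rw [hname], hi0, hi6⟩)
        · have hstep : pvStepB acc x = acc := by simp [pvStepB, hx, hacc, hlt]
          have hmin : min b i = b := by omega
          rw [hstep, hmin]
          exact ih acc b (Or.inr ⟨hacc, hb0, hb6⟩)

lemma B_char (ms : List String) : next_sync_needed_py_alt ms = pvNameOf (pvMin ms 7) := by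
  have h := rep_fold ms (none, "none") 7 (Or.inl ⟨rfl, rfl⟩)
  rcases h with ⟨hacc, hb⟩ | ⟨hacc, _, _⟩
  · rw [next_sync_needed_py_alt, hacc, hb]; rfl
  · rw [next_sync_needed_py_alt, hacc]

lemma pvMin_eq (ms : List String) (k : Int) (hk0 : 0 ≤ k) (hk6 : k ≤ 6)
    (hin : pvNameOf k ∈ ms) (habs : ∀ j, 0 ≤ j → j < k → pvNameOf j ∉ ms) :
    pvMin ms 7 = k := by
  have hub : pvMin ms 7 ≤ k := pvMin_le_of_mem ms 7 _ k hin (name_rank k hk0 hk6)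
  rcases pvMin_lb ms 7 with h7 | ⟨x, hx, hrk⟩
  · omega
  · obtain ⟨h0, h6, hname⟩ := rank_name_chain x _ hrk
    by_contra hne
    have hlt : pvMin ms 7 < k := lt_of_le_of_ne hub hne
    exact habs _ h0 hlt (hname ▸ hx)

lemma pvMin_none (ms : List String) (habs : ∀ j, 0 ≤ j → j ≤ 6 → pvNameOf j ∉ ms) :
    pvMin ms 7 = 7 := by
  rcases pvMin_lb ms 7 with h7 | ⟨x, hx, hrk⟩
  · exact h7
  · obtain ⟨h0, h6, hname⟩ := rank_name_chain x _ hrk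
    exact absurd (hname ▸ hx) (habs _ h0 h6)

lemma A_char (ms : List String) : next_sync_needed_py ms = pvNameOf (pvMin ms 7) := by
  by_cases h0 : "hiscores sync" ∈ ms
  · rw [pvMin_eq ms 0 (by omega) (by omega) h0 (by intro j hj hj'; omega)]
    simp [next_sync_needed_py, pvLoopA, pvPriority, pvNameOf, h0]
  · by_cases h1 : "runelite companion sync" ∈ ms
    · rw [pvMin_eq ms 1 (by omega) (by omega) h1
        (by intro j hj hj'; interval_cases j; simpa [pvNameOf] using h0)]
      simp [next_sync_needed_py, pvLoopA, pvPriority, pvNameOf, h0, h1]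
    · by_cases h2 : "bank sync" ∈ ms
      · rw [pvMin_eq ms 2 (by omega) (by omega) h2
          (by intro j hj hj'; interval_cases j <;> simp [pvNameOf] <;> assumption)]
        simp [next_sync_needed_py, pvLoopA, pvPriority, pvNameOf, h0, h1, h2]
      · by_cases h3 : "equipped gear" ∈ ms
        · rw [pvMin_eq ms 3 (by omega) (by omega) h3
            (by intro j hj hj'; interval_cases j <;> simp [pvNameOf] <;> assumption)]
          simp [next_sync_needed_py, pvLoopA, pvPriority, pvNameOf, h0, h1, h2, h3]
        · by_cases h4 : "active goal" ∈ ms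
          · rw [pvMin_eq ms 4 (by omega) (by omega) h4
              (by intro j hj hj'; interval_cases j <;> simp [pvNameOf] <;> assumption)]
            simp [next_sync_needed_py, pvLoopA, pvPriority, pvNameOf, h0, h1, h2, h3, h4]
          · by_cases h5 : "quest state" ∈ ms
            · rw [pvMin_eq ms 5 (by omega) (by omega) h5
                (by intro j hj hj'; interval_cases j <;> simp [pvNameOf] <;> assumption)]
              simp [next_sync_needed_py, pvLoopA, pvPriority, pvNameOf, h0, h1, h2, h3, h4, h5]
            · by_cases h6 : "gear ownership" ∈ ms
              · rw [pvMin_eq ms 6 (by omega) (by omega) h6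
                  (by intro j hj hj'; interval_cases j <;> simp [pvNameOf] <;> assumption)]
                simp [next_sync_needed_py, pvLoopA, pvPriority, pvNameOf, h0, h1, h2, h3, h4, h5, h6]
              · rw [pvMin_none ms
                  (by intro j hj hj'; interval_cases j <;> simp [pvNameOf] <;> assumption)]
                simp [next_sync_needed_py, pvLoopA, pvPriority, pvNameOf, h0, h1, h2, h3, h4, h5, h6]

-- ===== VERDICT (by name: the statement is the Claim_ definition above) =====
theorem next_sync_needed_py_spec : Claim_equal_next_sync_needed_py := by
  intro ms _
  unfold Spec_next_sync_needed_py
  rw [A_char, B_char]
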